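-- pv_equiv track=rewrite | github.com/thinktwice13/algos | codility/py/2-arrays.py | odd_occurences
-- ===== SOURCE A (Python) =====
-- def odd_occurences(A):
--     map = {}
--     for el in A:
--         if el in map:
--             map.pop(el)
--         else:
--             map[el] = 1
--
--     if len(map) != 1:
--         raise Exception("Invalid input")
--
--     return list(map.keys())[0]
-- ===== SOURCE B (Python) =====
-- def odd_occurences(A):
--     counts = {}
--     for el in A:
--         counts[el] = counts.get(el, 0) + 1
--     odds = [el for el, c in counts.items() if c % 2 == 1]
--     if len(odds) != 1:
--         raise Exception("Invalid input")
--     return odds[0]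
-- ===== Notes on version B (the rewrite author's own statement) =====
-- stated objective: alternative
-- what changed: Replaces the incremental parity-toggle dict (insert on first sight, pop on second) with a full frequency-count pass followed by a separate parity-filter pass over the finished counts.
import Mathlib
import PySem

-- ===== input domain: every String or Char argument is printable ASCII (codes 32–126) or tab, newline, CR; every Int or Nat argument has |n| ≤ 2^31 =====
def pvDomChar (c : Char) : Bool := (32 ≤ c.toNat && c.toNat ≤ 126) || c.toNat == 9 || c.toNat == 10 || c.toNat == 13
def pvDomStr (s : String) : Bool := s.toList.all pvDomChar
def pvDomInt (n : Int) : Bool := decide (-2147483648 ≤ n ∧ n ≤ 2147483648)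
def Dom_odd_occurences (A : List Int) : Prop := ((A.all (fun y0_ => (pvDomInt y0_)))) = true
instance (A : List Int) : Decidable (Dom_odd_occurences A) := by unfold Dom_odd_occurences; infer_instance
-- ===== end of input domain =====

-- B replaces A's incremental parity-toggle dict with a full frequency count followed by a
-- separate parity-filter pass (objective: alternative decomposition, same cost).


-- ===== PORT A =====
-- the body of A's loop: pop the key if present, else insert it with value 1
def pvToggle (d : PySem.Dict Int Int) (el : Int) : PySem.Dict Int Int :=
  if d.contains el then d.erase el else d.insert el 1

def odd_occurences (A : List Int) : Int :=
  let map := A.foldl pvToggle PySem.Dict.empty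
  -- 'if len(map) != 1: raise' is excluded by Pre_; 'list(map.keys())[0]' made total with a default
  PySem.List.pyGetD map.keys 0 0

-- ===== PORT B =====
def odd_occurences_alt (A : List Int) : Int :=
  let counts := A.foldl (fun d el => d.insert el (d.getD el 0 + 1)) PySem.Dict.empty
  let odds := (counts.items.filter (fun p => PySem.Int.mod p.2 2 == 1)).map (fun p => p.1)
  -- 'if len(odds) != 1: raise' is excluded by Pre_; 'odds[0]' made total with a default
  PySem.List.pyGetD odds 0 0

-- ===== PRECONDITION & SPEC =====
-- exactly the inputs where A returns: there is exactly one distinct element with odd count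
def Pre_odd_occurences (A : List Int) : Prop :=
  ((PySem.Set.ofList A).filter (fun x => A.count x % 2 == 1)).length = 1
instance (A : List Int) : Decidable (Pre_odd_occurences A) := by
  unfold Pre_odd_occurences; infer_instance
def pvWitness_odd_occurences : List Int := [2, 1, 2]

def Spec_odd_occurences (A : List Int) (out : Int) : Prop := out = odd_occurences_alt A
instance (A : List Int) (out : Int) : Decidable (Spec_odd_occurences A out) := by
  unfold Spec_odd_occurences; infer_instance

-- ===== CLAIM (what is proved, stated in full; the proofs are below) =====
def Claim_equal_odd_occurences : Prop := ∀ (A : List Int), Dom_odd_occurences A → Pre_odd_occurences A → Spec_odd_occurences A (odd_occurences A)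

-- ===== LEMMAS AND PROOFS =====

-- keys after erase: membership
lemma mem_keys_erase (d : PySem.Dict Int Int) (k x : Int) :
    x ∈ (d.erase k).keys ↔ x ∈ d.keys ∧ x ≠ k := by
  simp [PySem.Dict.erase, PySem.Dict.keys, List.mem_filter, List.mem_map]

-- keys after erase stay Nodup
lemma nodup_keys_erase (d : PySem.Dict Int Int) (k : Int) (h : d.keys.Nodup) :
    (d.erase k).keys.Nodup := by
  have hs : (d.erase k).keys.Sublist d.keys := by
    simpa [PySem.Dict.erase, PySem.Dict.keys] using
      (List.filter_sublist (l := d.items) (p := fun p => !p.1 == k)).map (fun p => p.1)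
  exact hs.nodup h

-- invariant of A's toggle loop: keys stay Nodup, and membership is the parity XOR
lemma toggle_invariant (l : List Int) (d : PySem.Dict Int Int) (hd : d.keys.Nodup) :
    (l.foldl pvToggle d).keys.Nodup ∧
      ∀ x, x ∈ (l.foldl pvToggle d).keys ↔ Xor' (x ∈ d.keys) (l.count x % 2 = 1) := by
  induction l generalizing d with
  | nil => exact ⟨hd, fun x => by simp [Xor']⟩
  | cons a l ih =>
    have hstep : (pvToggle d a).keys.Nodup := by
      unfold pvToggle
      split
      · exact nodup_keys_erase d a hd
      · exact PySem.Dict.nodup_keys_insert d a 1 hd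
    obtain ⟨hnd, hmem⟩ := ih (pvToggle d a) hstep
    refine ⟨by simpa using hnd, fun x => ?_⟩
    rw [List.foldl_cons, hmem x]
    have hstepmem : x ∈ (pvToggle d a).keys ↔ Xor' (x ∈ d.keys) (x = a) := by
      unfold pvToggle
      split_ifs with hc
      · rw [mem_keys_erase]
        constructor
        · rintro ⟨hx, hne⟩; exact Or.inl ⟨hx, hne⟩
        · rintro (⟨hx, hne⟩ | ⟨hxe, hna⟩)
          · exact ⟨hx, hne⟩
          · exact absurd (hxe ▸ (PySem.Dict.contains_iff_mem_keys d a).mp hc) hna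
      · rw [PySem.Dict.mem_keys_insert]
        have hna : a ∉ d.keys := fun h =>
          by simp [(PySem.Dict.contains_iff_mem_keys d a).mpr h] at hc
        constructor
        · rintro (rfl | hx)
          · exact Or.inr ⟨rfl, hna⟩
          · exact Or.inl ⟨hx, fun he => hna (he ▸ hx)⟩
        · rintro (⟨hx, _⟩ | ⟨rfl, _⟩)
          · exact Or.inr hx
          · exact Or.inl rfl
    rw [hstepmem]
    have hcnt : (a :: l).count x = l.count x + (if x = a then 1 else 0) := by
      by_cases hxa : x = a
      · simp [hxa]
      · have hax : ¬ a = x := fun h => hxa h.symm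
        simp [hxa, hax]
    rw [hcnt]
    unfold Xor'
    by_cases hxa : x = a
    · have h2 : (l.count x + (if x = a then 1 else 0)) % 2 = 1 ↔ ¬ (l.count x % 2 = 1) := by
        rw [if_pos hxa]; omega
      rw [h2]; tauto
    · have h2 : (l.count x + (if x = a then 1 else 0)) % 2 = 1 ↔ l.count x % 2 = 1 := by
        rw [if_neg hxa]; omega
      rw [h2]; tauto

-- a Nodup list whose members are exactly {x0} is [x0]
lemma nodup_singleton_char (l : List Int) (x0 : Int) (hnd : l.Nodup)
    (hm : ∀ x, x ∈ l ↔ x = x0) : l = [x0] := by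
  cases l with
  | nil => exact absurd ((hm x0).mpr rfl) (by simp)
  | cons a t =>
    have ha : a = x0 := (hm a).mp (by simp)
    subst ha
    have ht : t = [] := by
      cases t with
      | nil => rfl
      | cons b u =>
        have hb : b = a := (hm b).mp (by simp)
        subst hb
        simp at hnd
    simp [ht]

-- Pre_ unpacked: the unique element with odd count
lemma pre_unique (A : List Int) (h : Pre_odd_occurences A) :
    ∃ x0, A.count x0 % 2 = 1 ∧ ∀ x, A.count x % 2 = 1 → x = x0 := by
  unfold Pre_odd_occurences at h
  obtain ⟨x0, hx0⟩ := List.length_eq_one_iff.mp h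
  refine ⟨x0, ?_, ?_⟩
  · have : x0 ∈ (PySem.Set.ofList A).filter (fun x => A.count x % 2 == 1) := by
      rw [hx0]; simp
    simpa using (List.mem_filter.mp this).2
  · intro x hx
    have hxA : x ∈ A := List.count_pos_iff.mp (by omega)
    have : x ∈ (PySem.Set.ofList A).filter (fun x => A.count x % 2 == 1) :=
      List.mem_filter.mpr ⟨(PySem.Set.mem_ofList A x).mpr hxA, by simpa using hx⟩
    rw [hx0] at this; simpa using this

-- A's result: the toggle dict's key list is exactly [x0]
lemma portA_keys (A : List Int) (x0 : Int) (hodd : A.count x0 % 2 = 1)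
    (huniq : ∀ x, A.count x % 2 = 1 → x = x0) :
    (A.foldl pvToggle PySem.Dict.empty).keys = [x0] := by
  obtain ⟨hnd, hmem⟩ := toggle_invariant A PySem.Dict.empty (by simp [PySem.Dict.keys_empty])
  refine nodup_singleton_char _ x0 hnd fun x => ?_
  rw [hmem x]
  simp only [PySem.Dict.keys_empty, List.not_mem_nil]
  unfold Xor'
  constructor
  · rintro (⟨h, -⟩ | ⟨h, -⟩)
    · exact absurd h (by simp)
    · exact huniq x h
  · rintro rfl
    exact Or.inr ⟨hodd, by simp⟩

-- B's odds list is the Pre_ filter list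
lemma portB_odds (A : List Int) :
    ((((A.foldl (fun d el => d.insert el (d.getD el 0 + 1)) PySem.Dict.empty).items).filter
        (fun p => PySem.Int.mod p.2 2 == 1)).map (fun p => p.1)) =
      (PySem.Set.ofList A).filter (fun x => A.count x % 2 == 1) := by
  rw [PySem.Dict.foldl_insert_getD_add_one_eq_counter, PySem.Dict.items_counter,
    List.filter_map, List.map_map]
  have hp : ((fun p => PySem.Int.mod p.2 2 == 1) ∘ fun k => (k, (A.count k : Int))) =
      fun x => A.count x % 2 == 1 := by
    funext k
    have : PySem.Int.mod ((A.count k : Nat) : Int) ((2 : Nat) : Int) = ((A.count k % 2 : Nat) : Int) :=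
      PySem.Int.mod_natCast _ _
    simp only [Function.comp]
    rw [show ((2 : Int)) = ((2 : Nat) : Int) by norm_num, this]
    rcases Nat.mod_two_eq_zero_or_one (A.count k) with h | h <;> simp [h]
  rw [hp]
  simp [Function.comp_def]

-- ===== VERDICT (by name: the statement is the Claim_ definition above) =====
theorem odd_occurences_spec : Claim_equal_odd_occurences := by
  intro A _ hpre
  obtain ⟨x0, hodd, huniq⟩ := pre_unique A hpre
  have hA : odd_occurences A = x0 := by
    show PySem.List.pyGetD (A.foldl pvToggle PySem.Dict.empty).keys 0 0 = x0
    rw [portA_keys A x0 hodd huniq]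
    simp [PySem.List.pyGetD_zero_cons]
  have hfilter : (PySem.Set.ofList A).filter (fun x => A.count x % 2 == 1) = [x0] := by
    refine nodup_singleton_char _ x0 ?_ fun x => ?_
    · exact (PySem.Set.nodup_ofList A).filter _
    · constructor
      · intro hx
        exact huniq x (by simpa using (List.mem_filter.mp hx).2)
      · intro hx
        rw [hx]
        exact List.mem_filter.mpr
          ⟨(PySem.Set.mem_ofList A x0).mpr (List.count_pos_iff.mp (by omega)),
           by simpa using hodd⟩
  have hB : odd_occurences_alt A = x0 := by
    show PySem.List.pyGetD
      ((((A.foldl (fun d el => d.insert el (d.getD el 0 + 1)) PySem.Dict.empty).items).filter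
        (fun p => PySem.Int.mod p.2 2 == 1)).map (fun p => p.1)) 0 0 = x0
    rw [portB_odds A, hfilter]
    simp [PySem.List.pyGetD_zero_cons]
  unfold Spec_odd_occurences
  rw [hA, hB]
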